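-- pv_equiv track=rewrite | github.com/Choomai/htra_practice | null_libs/__init__.py | oddNeven
-- ===== SOURCE A (Python) =====
-- def oddNeven(inp: list) -> list:
--     odd,even,neg,pos = [],[],[],[]
--     for elem in inp:
--         if elem % 2 == 0: even.append(elem)
--         else: odd.append(elem)
--         if elem >= 0: pos.append(elem)
--         else: neg.append(elem)
--     return [odd,even,neg,pos]
-- ===== SOURCE B (Python) =====
-- def oddNeven(inp: list) -> list:
--     # Divide and conquer: split in half, partition each half recursively,
--     # then concatenate the four category lists pairwise.
--     n = len(inp)
--     if n == 0:
--         return [[], [], [], []]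
--     if n == 1:
--         e = inp[0]
--         return [[e] if e % 2 != 0 else [],
--                 [e] if e % 2 == 0 else [],
--                 [e] if e < 0 else [],
--                 [e] if e >= 0 else []]
--     mid = n // 2
--     left = oddNeven(inp[:mid])
--     right = oddNeven(inp[mid:])
--     return [a + b for a, b in zip(left, right)]
-- ===== Notes on version B (the rewrite author's own statement) =====
-- stated objective: alternative
-- what changed: Replaces A's single left-to-right loop with four shared accumulators by a divide-and-conquer recursion: the list is split in half, each half is partitioned recursively, and the four category lists are concatenated pairwise; correct because each category filter distributes over list concatenation.
import Mathlib
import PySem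

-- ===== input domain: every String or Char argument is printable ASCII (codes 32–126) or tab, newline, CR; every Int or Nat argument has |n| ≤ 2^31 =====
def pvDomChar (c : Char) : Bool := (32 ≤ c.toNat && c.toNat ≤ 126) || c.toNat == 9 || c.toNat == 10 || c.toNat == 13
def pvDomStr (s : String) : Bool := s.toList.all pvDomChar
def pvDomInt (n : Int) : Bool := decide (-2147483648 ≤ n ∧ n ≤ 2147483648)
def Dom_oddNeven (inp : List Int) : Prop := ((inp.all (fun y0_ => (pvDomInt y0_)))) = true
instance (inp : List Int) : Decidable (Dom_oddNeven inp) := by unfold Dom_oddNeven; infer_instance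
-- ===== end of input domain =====

-- ===== PORT A =====
-- B partitions by divide and conquer (split in half, recurse, concatenate the four
-- category lists pairwise) instead of A's single four-accumulator loop; alternative decomposition, same result.
def oddNeven (inp : List Int) : List (List Int) :=
  let st := inp.foldl (fun (s : List Int × List Int × List Int × List Int) elem =>
    let (odd, even, neg, pos) := s
    let (odd, even) := if PySem.Int.mod elem 2 = 0 then (odd, even ++ [elem]) else (odd ++ [elem], even)
    let (neg, pos) := if elem ≥ 0 then (neg, pos ++ [elem]) else (neg ++ [elem], pos)
    (odd, even, neg, pos)) ([], [], [], [])
  [st.1, st.2.1, st.2.2.1, st.2.2.2]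

-- ===== PORT B =====
-- inp[:mid] / inp[mid:] with 0 ≤ mid ≤ len(inp) are exactly List.take mid / List.drop mid.
def oddNeven_alt (inp : List Int) : List (List Int) :=
  match inp with
  | [] => [[], [], [], []]
  | [e] => [if PySem.Int.mod e 2 ≠ 0 then [e] else [],
            if PySem.Int.mod e 2 = 0 then [e] else [],
            if e < 0 then [e] else [],
            if e ≥ 0 then [e] else []]
  | x :: y :: t =>
    let l := x :: y :: t
    let mid := l.length / 2
    let left := oddNeven_alt (l.take mid)
    let right := oddNeven_alt (l.drop mid)
    List.zipWith (fun a b => a ++ b) left right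
termination_by inp.length
decreasing_by
  · simp [List.length_take]; omega
  · simp [List.length_drop]; omega

-- ===== PRECONDITION & SPEC =====
def Spec_oddNeven (inp : List Int) (out : List (List Int)) : Prop := out = oddNeven_alt inp
instance (inp : List Int) (out : List (List Int)) : Decidable (Spec_oddNeven inp out) := by unfold Spec_oddNeven; infer_instance

-- ===== CLAIM (what is proved, stated in full; the proofs are below) =====
def Claim_equal_oddNeven : Prop := ∀ (inp : List Int), Dom_oddNeven inp → Spec_oddNeven inp (oddNeven inp)

-- ===== LEMMAS AND PROOFS =====
-- A's loop, started from arbitrary accumulators, appends the four filters.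
theorem oddNeven_loop (inp o e n p : List Int) :
    inp.foldl (fun (s : List Int × List Int × List Int × List Int) elem =>
      let (odd, even, neg, pos) := s
      let (odd, even) := if PySem.Int.mod elem 2 = 0 then (odd, even ++ [elem]) else (odd ++ [elem], even)
      let (neg, pos) := if elem ≥ 0 then (neg, pos ++ [elem]) else (neg ++ [elem], pos)
      (odd, even, neg, pos)) (o, e, n, p)
    = (o ++ inp.filter (fun x => PySem.Int.mod x 2 ≠ 0),
       e ++ inp.filter (fun x => PySem.Int.mod x 2 = 0),
       n ++ inp.filter (fun x => x < 0),
       p ++ inp.filter (fun x => x ≥ 0)) := by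
  induction inp generalizing o e n p with
  | nil => simp
  | cons hd tl ih =>
    have hneg : (decide (hd < 0)) = !decide (hd ≥ 0) := by
      by_cases h : hd ≥ 0 <;> simp [h] <;> omega
    simp only [List.foldl_cons, List.filter_cons, ih, hneg]
    have he : hd % 2 = if (2:Int) ∣ hd then 0 else 1 := by
      rcases Int.emod_two_eq hd with h | h <;> simp [h]
    by_cases h2 : (2 : Int) ∣ hd <;> by_cases hp : hd ≥ 0 <;>
      simp [h2, hp, he, List.append_assoc]

-- B computes the same four filters (filters distribute over take ++ drop).
theorem oddNeven_alt_eq (inp : List Int) :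
    oddNeven_alt inp
    = [inp.filter (fun x => PySem.Int.mod x 2 ≠ 0),
       inp.filter (fun x => PySem.Int.mod x 2 = 0),
       inp.filter (fun x => x < 0),
       inp.filter (fun x => x ≥ 0)] := by
  induction inp using oddNeven_alt.induct with
  | case1 => simp [oddNeven_alt]
  | case2 e =>
    have hn : (decide (e < 0)) = !decide (e ≥ 0) := by
      by_cases h : e ≥ 0 <;> simp [h] <;> omega
    have he : e % 2 = if (2:Int) ∣ e then 0 else 1 := by
      rcases Int.emod_two_eq e with h | h <;> simp [h]
    simp only [oddNeven_alt, List.filter_cons, List.filter_nil, hn]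
    by_cases h2 : (2 : Int) ∣ e <;> by_cases hp : e ≥ 0 <;>
      simp [h2, hp, he]
  | case3 x y t l mid ihl ihr =>
    rw [oddNeven_alt, ihl, ihr]
    have key : ∀ p : Int → Bool, (List.take mid l).filter p ++ (List.drop mid l).filter p
        = (x :: y :: t).filter p := fun p => by
      rw [← List.filter_append, List.take_append_drop]
    simp [List.zipWith, key]

-- ===== VERDICT (by name: the statement is the Claim_ definition above) =====
theorem oddNeven_spec : Claim_equal_oddNeven := by
  intro inp _
  show oddNeven inp = oddNeven_alt inp
  unfold oddNeven
  rw [oddNeven_loop, oddNeven_alt_eq]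
  simp
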